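-- pv_equiv track=rewrite | github.com/mjenrungrot/autolab | tests/test_guardrails.py | _simulate_update_docs_cycles
-- ===== SOURCE A (Python) =====
-- def _simulate_update_docs_cycles(
--     num_cycles: int,
--     max_update_docs_cycles: int = 3,
-- ) -> tuple[bool, int]:
--     """Simulate N extract_results -> update_docs transitions and
--     return (breached, final_count)."""
--     update_docs_cycle_count = 0
--     breached = False
--     for _ in range(num_cycles):
--         update_docs_cycle_count += 1
--         if update_docs_cycle_count > max_update_docs_cycles:
--             breached = True
--             break
--     return (breached, update_docs_cycle_count)
-- ===== SOURCE B (Python) =====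
-- def _simulate_update_docs_cycles(
--     num_cycles: int,
--     max_update_docs_cycles: int = 3,
-- ) -> tuple[bool, int]:
--     """Closed-form: the loop stops at min(num_cycles, cap) where cap is the
--     first count that exceeds the threshold (at least 1)."""
--     if num_cycles <= 0:
--         return (False, 0)
--     cap = max(max_update_docs_cycles + 1, 1)
--     count = min(num_cycles, cap)
--     return (count > max_update_docs_cycles, count)
-- ===== Notes on version B (the rewrite author's own statement) =====
-- stated objective: faster
-- what changed: Replaced the cycle-by-cycle simulation loop with a closed-form: final count = min(num_cycles, max(max+1, 1)) and breached = count > max, computed in O(1).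
import Mathlib
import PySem

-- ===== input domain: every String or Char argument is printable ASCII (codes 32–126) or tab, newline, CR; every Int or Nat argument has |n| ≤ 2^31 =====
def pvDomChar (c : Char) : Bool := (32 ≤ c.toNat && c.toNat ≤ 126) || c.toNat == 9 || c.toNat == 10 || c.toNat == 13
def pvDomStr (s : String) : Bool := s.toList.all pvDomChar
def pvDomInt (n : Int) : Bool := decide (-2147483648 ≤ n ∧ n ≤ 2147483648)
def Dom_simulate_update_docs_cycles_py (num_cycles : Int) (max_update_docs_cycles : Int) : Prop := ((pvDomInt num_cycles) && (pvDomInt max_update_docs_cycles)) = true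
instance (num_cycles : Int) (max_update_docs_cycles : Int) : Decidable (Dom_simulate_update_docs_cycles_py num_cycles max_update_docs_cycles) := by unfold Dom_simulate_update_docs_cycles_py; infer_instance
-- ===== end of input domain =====

-- B replaces the cycle-by-cycle simulation loop with an O(1) closed form: count = min(num_cycles, max(max+1,1)), breached = count > max (objective: faster).


-- ===== PORT A =====
-- loop over range(num_cycles): bump the count, break with breached=True once it exceeds the threshold
def pvLoopA : Nat → Int → Int → Bool × Int
  | 0, count, _ => (false, count)
  | n + 1, count, m =>
    let c := count + 1
    if c > m then (true, c) else pvLoopA n c m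

def simulate_update_docs_cycles_py (num_cycles : Int) (max_update_docs_cycles : Int) : Bool × Int :=
  pvLoopA num_cycles.toNat 0 max_update_docs_cycles

-- ===== PORT B =====
-- B: closed-form — count = min(num_cycles, max(max+1,1)), breached = count > max
def simulate_update_docs_cycles_py_alt (num_cycles : Int) (max_update_docs_cycles : Int) : Bool × Int :=
  if num_cycles ≤ 0 then (false, 0)
  else
    let cap := max (max_update_docs_cycles + 1) 1
    let count := min num_cycles cap
    (decide (count > max_update_docs_cycles), count)

-- ===== PRECONDITION & SPEC =====
def Spec_simulate_update_docs_cycles_py (num_cycles : Int) (max_update_docs_cycles : Int) (out : Bool × Int) : Prop := out = simulate_update_docs_cycles_py_alt num_cycles max_update_docs_cycles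
instance (num_cycles : Int) (max_update_docs_cycles : Int) (out : Bool × Int) : Decidable (Spec_simulate_update_docs_cycles_py num_cycles max_update_docs_cycles out) := by unfold Spec_simulate_update_docs_cycles_py; infer_instance

-- ===== CLAIM (what is proved, stated in full; the proofs are below) =====
def Claim_equal_simulate_update_docs_cycles_py : Prop := ∀ (num_cycles : Int) (max_update_docs_cycles : Int), Dom_simulate_update_docs_cycles_py num_cycles max_update_docs_cycles → Spec_simulate_update_docs_cycles_py num_cycles max_update_docs_cycles (simulate_update_docs_cycles_py num_cycles max_update_docs_cycles)

-- ===== LEMMAS AND PROOFS =====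
-- invariant for the non-negative-threshold case: starting from count c ≤ m
lemma pvLoopA_inv (m : Int) (n : Nat) : ∀ c : Int, 0 ≤ c → c ≤ m →
    pvLoopA n c m = if (n : Int) + c ≤ m then (false, c + n) else (true, m + 1) := by
  induction n with
  | zero => intro c _ hc; simp [pvLoopA]; omega
  | succ k ih =>
    intro c hc0 hcm
    by_cases h : c + 1 > m
    · have hcm' : c = m := by omega
      simp only [pvLoopA, if_pos h]
      rw [if_neg (by omega), hcm']
    · push_neg at h
      simp only [pvLoopA]
      rw [if_neg (by omega)]
      rw [ih (c + 1) (by omega) h]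
      have : ((k : Int) + (c + 1) ≤ m) = (((k : Nat) + 1 : Nat) + c ≤ m) := by
        push_cast; apply propext; omega
      by_cases h2 : (k : Int) + (c + 1) ≤ m
      · rw [if_pos h2, if_pos (by push_cast at h2 ⊢; omega)]
        simp only [Prod.mk.injEq, true_and]
        push_cast; ring
      · rw [if_neg h2, if_neg (by push_cast at h2 ⊢; omega)]

-- ===== VERDICT (by name: the statement is the Claim_ definition above) =====
theorem simulate_update_docs_cycles_py_spec : Claim_equal_simulate_update_docs_cycles_py := by
  intro n m _
  unfold Spec_simulate_update_docs_cycles_py simulate_update_docs_cycles_py simulate_update_docs_cycles_py_alt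
  by_cases hn : n ≤ 0
  · have : n.toNat = 0 := by omega
    simp [this, pvLoopA, hn]
  · push_neg at hn
    rw [if_neg (by omega)]
    by_cases hm : m < 0
    · -- threshold below 1: first iteration breaches
      obtain ⟨k, hk⟩ : ∃ k : Nat, n.toNat = k + 1 := ⟨n.toNat - 1, by omega⟩
      rw [hk]
      simp only [pvLoopA]
      rw [if_pos (by omega)]
      have hcap : max (m + 1) 1 = 1 := by omega
      have hmin : min n (1 : Int) = 1 := by omega
      simp [hcap, hmin]
      omega
    · push_neg at hm
      rw [pvLoopA_inv m n.toNat 0 (by omega) hm]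
      have hcast : ((n.toNat : Int)) = n := by omega
      have hcap : max (m + 1) 1 = m + 1 := by omega
      rw [hcast, hcap]
      by_cases h : n + 0 ≤ m
      · rw [if_pos h]
        have : min n (m + 1) = n := by omega
        have hle : ¬ (n > m) := by omega
        simp [this, hle]
      · rw [if_neg h]
        have : min n (m + 1) = m + 1 := by omega
        have hgt : m + 1 > m := by omega
        simp [this, hgt]
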